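-- pv_equiv track=rewrite | github.com/rmluck/NASA-Media-Explorer | backend/indexer/search.py | phrase_score
-- ===== SOURCE A (Python) =====
-- def phrase_score(doc_id: str, query_tokens: list[str], inverted_index: dict[str, dict[str, float]]) -> int:
--     """
--     Count how many times the exact phrase appears in the document.
--
--     Parameters:
--         doc_id (str): The document ID.
--         query_tokens (list): The list of tokens in the query phrase.
--         inverted_index (dict): The inverted index mapping terms to document IDs and their token positions.
--
--     Returns:
--         int: The count of the exact phrase occurrences in the document.
--     """
--
--     # If the query has less than 2 tokens, it cannot be a phrase
--     if len(query_tokens) < 2: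
--         return 0
--
--     # Get the positions of the first token in the query phrase
--     first_token = query_tokens[0]
--     if first_token not in inverted_index or doc_id not in inverted_index[first_token]:
--         return 0
--
--     # Get the positions of the first token in the document
--     first_positions = inverted_index[first_token][doc_id]["positions"]
--
--     # Iterate through the positions of the first token to find matching phrases
--     phrase_count = 0
--     for pos in first_positions:
--         # Check if the subsequent tokens in the phrase match the positions
--         match = True
--         # Check for each subsequent token in the phrase
--         for offset, token in enumerate(query_tokens[1:], start=1):
--             if token not in inverted_index or doc_id not in inverted_index[token]:
--                 match = False
--                 break
--             if pos + offset not in inverted_index[token][doc_id]["positions"]: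
--                 match = False
--                 break
--
--         # If all tokens matched in sequence, increment the phrase count
--         if match:
--             phrase_count += 1
--
--     # Return the count of the exact phrase occurrences
--     return phrase_count
-- ===== SOURCE B (Python) =====
-- def phrase_score(doc_id: str, query_tokens: list[str], inverted_index: dict[str, dict[str, dict[str, list[int]]]]) -> int:
--     # Intersect per-token position sets (shifted by offset) instead of
--     # verifying each anchor with a nested offset loop.
--     if len(query_tokens) < 2:
--         return 0
--     pos_lists = []
--     for token in query_tokens:
--         docs = inverted_index.get(token)
--         if docs is None or doc_id not in docs:
--             return 0
--         pos_lists.append(docs[doc_id]["positions"])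
--     valid = set(pos_lists[0])
--     for offset in range(1, len(pos_lists)):
--         valid &= {p - offset for p in pos_lists[offset]}
--     # iterate the original first-token list so duplicates keep their multiplicity
--     return sum(1 for p in pos_lists[0] if p in valid)
-- ===== Notes on version B (the rewrite author's own statement) =====
-- stated objective: alternative
-- what changed: A anchors on each first-token position and re-checks every later token with a nested offset loop and a linear 'in positions' probe per anchor; B fetches each token's position list once, intersects the offset-shifted position sets into one set of valid phrase starts, and counts first-token positions that are valid starts by set membership.
import Mathlib
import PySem

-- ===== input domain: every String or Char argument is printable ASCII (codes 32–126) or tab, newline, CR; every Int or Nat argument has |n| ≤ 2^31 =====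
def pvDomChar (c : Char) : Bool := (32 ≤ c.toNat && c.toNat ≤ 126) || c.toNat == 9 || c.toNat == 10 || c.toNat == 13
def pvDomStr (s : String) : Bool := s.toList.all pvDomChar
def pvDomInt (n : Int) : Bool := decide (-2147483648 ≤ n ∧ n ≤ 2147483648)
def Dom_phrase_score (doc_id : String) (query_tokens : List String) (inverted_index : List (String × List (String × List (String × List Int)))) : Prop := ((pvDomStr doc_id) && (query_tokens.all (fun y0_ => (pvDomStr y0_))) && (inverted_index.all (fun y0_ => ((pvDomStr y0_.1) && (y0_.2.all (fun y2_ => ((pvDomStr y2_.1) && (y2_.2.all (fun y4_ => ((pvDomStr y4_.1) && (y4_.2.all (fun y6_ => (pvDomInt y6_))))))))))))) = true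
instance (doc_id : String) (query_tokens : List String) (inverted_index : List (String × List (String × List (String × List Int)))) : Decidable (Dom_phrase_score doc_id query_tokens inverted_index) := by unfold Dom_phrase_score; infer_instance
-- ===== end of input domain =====

-- B replaces A's per-anchor nested verification loop by one set intersection of
-- offset-shifted position sets, then counts first-token positions that are valid starts.

-- shared dict-lookup helper (Python 'd[k]' / 'd.get(k)' on an association list, first match)
def pvGet {V : Type} (l : List (String × V)) (k : String) : Option V :=
  (PySem.Dict.mk l).get? k

-- ===== PORT A =====
-- inner loop: 'for offset, token in enumerate(query_tokens[1:], start=1)' with break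
def aMatch (doc_id : String) (inverted_index : List (String × List (String × List (String × List Int)))) (pos : Int) : Int → List String → Bool
  | _, [] => true
  | off, token :: rest =>
    match pvGet inverted_index token with
    | none => false
    | some docs =>
      match pvGet docs doc_id with
      | none => false
      | some m =>
        match pvGet m "positions" with
        | none => false  -- Python raises KeyError here; excluded by Pre_
        | some ps => if (pos + off) ∈ ps then aMatch doc_id inverted_index pos (off + 1) rest else false

def phrase_score (doc_id : String) (query_tokens : List String) (inverted_index : List (String × List (String × List (String × List Int)))) : Int :=
  if query_tokens.length < 2 then 0
  else
    match query_tokens with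
    | [] => 0  -- unreachable: length ≥ 2
    | first_token :: rest =>
      match pvGet inverted_index first_token with
      | none => 0
      | some docs =>
        match pvGet docs doc_id with
        | none => 0
        | some m =>
          match pvGet m "positions" with
          | none => 0  -- Python raises KeyError here; excluded by Pre_
          | some first_positions =>
            first_positions.foldl
              (fun acc pos => if aMatch doc_id inverted_index pos 1 rest then acc + 1 else acc) 0

-- ===== PORT B =====
-- collect each query token's position list; none = early 'return 0' (absent token/doc) or KeyError (excluded by Pre_)
def bPosLists (doc_id : String) (inverted_index : List (String × List (String × List (String × List Int)))) : List String → Option (List (List Int))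
  | [] => some []
  | t :: rest =>
    match pvGet inverted_index t with
    | none => none
    | some docs =>
      match pvGet docs doc_id with
      | none => none
      | some m =>
        match pvGet m "positions" with
        | none => none  -- Python raises KeyError here; excluded by Pre_
        | some ps => (bPosLists doc_id inverted_index rest).map (ps :: ·)

-- 'for offset in range(1, len(pos_lists)): valid &= {p - offset for p in pos_lists[offset]}'
def bReduce : PySem.Set Int → Int → List (List Int) → PySem.Set Int
  | v, _, [] => v
  | v, off, ps :: rest => bReduce (PySem.Set.inter v (PySem.Set.ofList (ps.map (· - off)))) (off + 1) rest

def phrase_score_alt (doc_id : String) (query_tokens : List String) (inverted_index : List (String × List (String × List (String × List Int)))) : Int :=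
  if query_tokens.length < 2 then 0
  else
    match bPosLists doc_id inverted_index query_tokens with
    | none => 0
    | some [] => 0  -- unreachable: query_tokens nonempty
    | some (ps0 :: restLists) =>
      let valid := bReduce (PySem.Set.ofList ps0) 1 restLists
      ps0.foldl (fun acc p => if valid.contains p then acc + 1 else acc) 0

-- ===== PRECONDITION & SPEC =====
-- Pre_ excludes inputs where some query token's per-document entry lacks the "positions"
-- key: there Python A raises KeyError whenever its scan reaches that entry (and B may
-- raise where A happens to short-circuit to 0), so no return value can be claimed.
def Pre_phrase_score (doc_id : String) (query_tokens : List String) (inverted_index : List (String × List (String × List (String × List Int)))) : Prop :=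
  (query_tokens.all (fun t =>
    match pvGet inverted_index t with
    | none => true
    | some docs =>
      match pvGet docs doc_id with
      | none => true
      | some m => (pvGet m "positions").isSome)) = true
instance (doc_id : String) (query_tokens : List String) (inverted_index : List (String × List (String × List (String × List Int)))) : Decidable (Pre_phrase_score doc_id query_tokens inverted_index) := by unfold Pre_phrase_score; infer_instance

def pvWitness_phrase_score : String × List String × (List (String × List (String × List (String × List Int)))) :=
  ("d", ["a", "b"], [("a", [("d", [("positions", [0, 3])])]), ("b", [("d", [("positions", [1, 4])])])])

def Spec_phrase_score (doc_id : String) (query_tokens : List String) (inverted_index : List (String × List (String × List (String × List Int)))) (out : Int) : Prop := out = phrase_score_alt doc_id query_tokens inverted_index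
instance (doc_id : String) (query_tokens : List String) (inverted_index : List (String × List (String × List (String × List Int)))) (out : Int) : Decidable (Spec_phrase_score doc_id query_tokens inverted_index out) := by unfold Spec_phrase_score; infer_instance

-- ===== CLAIM (what is proved, stated in full; the proofs are below) =====
def Claim_equal_phrase_score : Prop := ∀ (doc_id : String) (query_tokens : List String) (inverted_index : List (String × List (String × List (String × List Int)))), Dom_phrase_score doc_id query_tokens inverted_index → Pre_phrase_score doc_id query_tokens inverted_index → Spec_phrase_score doc_id query_tokens inverted_index (phrase_score doc_id query_tokens inverted_index)

-- ===== LEMMAS AND PROOFS =====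

-- "pos is a valid continuation start": pos+off ∈ ls[0], pos+off+1 ∈ ls[1], …
def AllShift (pos : Int) : Int → List (List Int) → Prop
  | _, [] => True
  | off, ps :: r => pos + off ∈ ps ∧ AllShift pos (off + 1) r

theorem aMatch_iff_allShift (doc_id : String) (inv : List (String × List (String × List (String × List Int)))) (pos : Int) :
    ∀ (toks : List String) (off : Int) (ls : List (List Int)),
      bPosLists doc_id inv toks = some ls →
      (aMatch doc_id inv pos off toks = true ↔ AllShift pos off ls) := by
  intro toks
  induction toks with
  | nil =>
    intro off ls h
    simp [bPosLists] at h
    subst h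
    simp [aMatch, AllShift]
  | cons t rest ih =>
    intro off ls h
    simp only [bPosLists] at h
    cases h1 : pvGet inv t with
    | none => simp only [h1] at h; simp at h
    | some docs =>
      simp only [h1] at h
      cases h2 : pvGet docs doc_id with
      | none => simp only [h2] at h; simp at h
      | some m =>
        simp only [h2] at h
        cases h3 : pvGet m "positions" with
        | none => rw [h3] at h; simp at h
        | some ps =>
          simp only [h3] at h
          cases h4 : bPosLists doc_id inv rest with
          | none => simp only [h4] at h; simp at h
          | some ls' =>
            simp only [h4] at h
            simp only [Option.map_some, Option.some.injEq] at h
            subst h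
            simp only [aMatch, h1, h2, h3, AllShift]
            by_cases hm : (pos + off) ∈ ps
            · simp [hm, ih (off + 1) ls' h4]
            · simp [hm]

theorem aMatch_false_of_none (doc_id : String) (inv : List (String × List (String × List (String × List Int)))) :
    ∀ (toks : List String),
      (toks.all (fun t =>
        match pvGet inv t with
        | none => true
        | some docs =>
          match pvGet docs doc_id with
          | none => true
          | some m => (pvGet m "positions").isSome) = true) →
      bPosLists doc_id inv toks = none →
      ∀ (pos off : Int), aMatch doc_id inv pos off toks = false := by
  intro toks
  induction toks with
  | nil => intro _ h; simp [bPosLists] at h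
  | cons t rest ih =>
    intro hpre h pos off
    simp only [List.all_cons, Bool.and_eq_true] at hpre
    obtain ⟨hpt, hprest⟩ := hpre
    simp only [bPosLists] at h
    cases h1 : pvGet inv t with
    | none => simp [aMatch, h1]
    | some docs =>
      simp only [h1] at h hpt
      cases h2 : pvGet docs doc_id with
      | none => simp [aMatch, h1, h2]
      | some m =>
        simp only [h2] at h hpt
        cases h3 : pvGet m "positions" with
        | none => simp [h3] at hpt
        | some ps =>
          simp only [h3] at h
          cases h4 : bPosLists doc_id inv rest with
          | some ls => simp only [h4] at h; simp at h
          | none =>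
            simp only [aMatch, h1, h2, h3]
            by_cases hm : (pos + off) ∈ ps
            · simp [hm, ih hprest h4]
            · simp [hm]

theorem mem_bReduce (p : Int) :
    ∀ (lists : List (List Int)) (v : PySem.Set Int) (off : Int),
      p ∈ bReduce v off lists ↔ p ∈ v ∧ AllShift p off lists := by
  intro lists
  induction lists with
  | nil => intro v off; simp [bReduce, AllShift]
  | cons ps rest ih =>
    intro v off
    simp only [bReduce, AllShift, ih, PySem.Set.mem_inter, PySem.Set.mem_ofList, List.mem_map]
    constructor
    · rintro ⟨⟨hv, q, hq, hqe⟩, hrest⟩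
      refine ⟨hv, ?_, hrest⟩
      have : q = p + off := by omega
      subst this; exact hq
    · rintro ⟨hv, hmem, hrest⟩
      exact ⟨⟨hv, p + off, hmem, by omega⟩, hrest⟩

theorem foldl_count_congr (f g : Int → Bool) :
    ∀ (xs : List Int), (∀ x ∈ xs, f x = g x) →
      ∀ (acc : Int),
        xs.foldl (fun a x => if f x then a + 1 else a) acc =
        xs.foldl (fun a x => if g x then a + 1 else a) acc := by
  intro xs
  induction xs with
  | nil => intro _ _; rfl
  | cons x rest ih =>
    intro h acc
    simp only [List.foldl_cons, h x (List.mem_cons_self ..)]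
    exact ih (fun y hy => h y (List.mem_cons_of_mem _ hy)) _

theorem foldl_count_false (f : Int → Bool) :
    ∀ (xs : List Int), (∀ x ∈ xs, f x = false) →
      ∀ (acc : Int), xs.foldl (fun a x => if f x then a + 1 else a) acc = acc := by
  intro xs
  induction xs with
  | nil => intro _ _; rfl
  | cons x rest ih =>
    intro h acc
    simp only [List.foldl_cons, h x (List.mem_cons_self ..), if_neg Bool.false_ne_true]
    exact ih (fun y hy => h y (List.mem_cons_of_mem _ hy)) acc

-- ===== VERDICT (by name: the statement is the Claim_ definition above) =====
theorem phrase_score_spec : Claim_equal_phrase_score := by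
  intro doc_id query_tokens inv _hdom hpre
  unfold Spec_phrase_score
  unfold phrase_score phrase_score_alt
  by_cases hlen : query_tokens.length < 2
  · simp [hlen]
  · simp only [hlen, if_false]
    match query_tokens, hpre with
    | [], _ => simp at hlen
    | first :: rest, hpre =>
      unfold Pre_phrase_score at hpre
      simp only [List.all_cons, Bool.and_eq_true] at hpre
      obtain ⟨hpf, hprest⟩ := hpre
      simp only [bPosLists]
      cases h1 : pvGet inv first with
      | none => simp
      | some docs =>
        simp only [h1] at hpf
        cases h2 : pvGet docs doc_id with
        | none => simp [h2]
        | some m =>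
          simp only [h2] at hpf
          cases h3 : pvGet m "positions" with
          | none => simp [h3] at hpf
          | some ps0 =>
            simp only [h2, h3]
            cases h4 : bPosLists doc_id inv rest with
            | none =>
              simp only [Option.map_none]
              exact foldl_count_false _ ps0
                (fun pos _ => aMatch_false_of_none doc_id inv rest hprest h4 pos 1) 0
            | some ls =>
              simp only [Option.map_some]
              apply foldl_count_congr
              intro p hp
              have hA := aMatch_iff_allShift doc_id inv p rest 1 ls h4
              have hB := mem_bReduce p ls (PySem.Set.ofList ps0) 1
              have hmem : p ∈ PySem.Set.ofList ps0 := (PySem.Set.mem_ofList ..).mpr hp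
              by_cases hs : AllShift p 1 ls
              · rw [hA.mpr hs]
                exact (List.elem_eq_true_of_mem (hB.mpr ⟨hmem, hs⟩)).symm
              · have hAf : aMatch doc_id inv p 1 rest = false := by
                  cases hv : aMatch doc_id inv p 1 rest
                  · rfl
                  · exact absurd (hA.mp hv) hs
                have hBf : (bReduce (PySem.Set.ofList ps0) 1 ls).contains p = false := by
                  cases hv : (bReduce (PySem.Set.ofList ps0) 1 ls).contains p
                  · rfl
                  · exact absurd ((hB.mp (List.mem_of_elem_eq_true hv)).2) hs
                rw [hAf, hBf]
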